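-- pv_equiv track=rewrite | github.com/Daishijun/InterviewAlgorithmCoding | bishi/redbook/prac1.py | func
-- ===== SOURCE A (Python) =====
-- def getmaxtimes(n):
--     res = 0
--     while n:
--         res +=n//5
--         n= n//5
--     return res
--
-- def func(n):
--     if n<0:
--         return 0
--     t = 0
--     res = 0
--     for i in range(1,n+1):
--         # if i%5==0:
--         #     t = getmaxtimes(i)
--         # res +=t
--         res += getmaxtimes(i)
--     return res
-- ===== SOURCE B (Python) =====
-- def func(n):
--     # Closed-form sum of floor(i/p) over i=1..n for each power of 5; O(log n).
--     if n <= 0: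
--         return 0
--     res = 0
--     p = 5
--     while p <= n:
--         q, r = divmod(n, p)
--         res += p * q * (q - 1) // 2 + q * (r + 1)
--         p *= 5
--     return res
-- ===== Notes on version B (the rewrite author's own statement) =====
-- stated objective: faster
-- what changed: Replaces the per-i loop calling getmaxtimes with a closed-form sum of floor(i/p) over i=1..n evaluated once for each power of 5 up to n.
import Mathlib
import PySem

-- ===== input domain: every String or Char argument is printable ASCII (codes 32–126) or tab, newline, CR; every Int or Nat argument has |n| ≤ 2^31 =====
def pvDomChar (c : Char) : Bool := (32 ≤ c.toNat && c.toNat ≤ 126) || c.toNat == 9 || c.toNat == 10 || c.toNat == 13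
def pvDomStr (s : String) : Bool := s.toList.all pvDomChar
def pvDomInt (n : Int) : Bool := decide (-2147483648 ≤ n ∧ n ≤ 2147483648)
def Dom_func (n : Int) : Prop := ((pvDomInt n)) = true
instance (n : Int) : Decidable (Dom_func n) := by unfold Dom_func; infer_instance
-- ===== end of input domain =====

-- B replaces A's per-i scan with a closed-form sum of floor(i/p) over i=1..n,
-- evaluated once for each power of 5 up to n (objective: faster, asymptotic).

-- ===== PORT A =====
-- while n: res += n//5; n = n//5  — structural recursion; the 0 < n guard makes it total
-- (Python's loop diverges for n < 0; func only calls it with i ≥ 1, and at n = 0 it returns 0 as Python does).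
def getmaxtimes (n : Int) : Int :=
  if _h : 0 < n then
    PySem.Int.floordiv n 5 + getmaxtimes (PySem.Int.floordiv n 5)
  else 0
termination_by n.toNat
decreasing_by
  rw [PySem.Int.floordiv_eq_ediv_of_pos (by omega : (0:Int) < 5)]
  omega

def func (n : Int) : Int :=
  if n < 0 then 0
  else (PySem.List.pyRange 1 (n + 1) 1).foldl (fun res i => res + getmaxtimes i) 0

-- ===== PORT B =====
def sumFloorB (n p : Int) : Int :=
  let q := PySem.Int.floordiv n p
  let r := PySem.Int.mod n p
  PySem.Int.floordiv (p * q * (q - 1)) 2 + q * (r + 1)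

-- while p <= n: res += closed form for p; p *= 5  — the 0 < p guard only makes the recursion
-- total (p is always a positive power of 5 when called from func_alt).
def powLoopB (n p : Int) : Int :=
  if h : p ≤ n ∧ 0 < p then sumFloorB n p + powLoopB n (5 * p) else 0
termination_by (n + 1 - p).toNat
decreasing_by obtain ⟨h1, h2⟩ := h; omega

def func_alt (n : Int) : Int :=
  if n ≤ 0 then 0 else powLoopB n 5

-- ===== PRECONDITION & SPEC =====
def Spec_func (n : Int) (out : Int) : Prop := out = func_alt n
instance (n : Int) (out : Int) : Decidable (Spec_func n out) := by unfold Spec_func; infer_instance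

-- ===== CLAIM (what is proved, stated in full; the proofs are below) =====
def Claim_equal_func : Prop := ∀ (n : Int), Dom_func n → Spec_func n (func n)

-- ===== LEMMAS AND PROOFS =====

-- partial sums of A's summands, recursion on a Nat bound
def sgSum : Nat → Int
  | 0 => 0
  | m + 1 => sgSum m + getmaxtimes ((m : Int) + 1)

-- truncated B-side sums with an explicit number K of powers of 5
def tSum (n : Int) : Int → Nat → Int
  | _, 0 => 0
  | p, K + 1 => sumFloorB n p + tSum n (5 * p) K

def gtSum (n : Int) : Int → Nat → Int
  | _, 0 => 0
  | p, K + 1 => PySem.Int.floordiv n p + gtSum n (5 * p) K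

theorem sumFloorB_zero {n p : Int} (hn : 0 ≤ n) (hnp : n < p) : sumFloorB n p = 0 := by
  have hp : 0 < p := by omega
  unfold sumFloorB
  rw [PySem.Int.floordiv_eq_ediv_of_pos hp, PySem.Int.mod_eq_emod_of_pos hp]
  have hq : n / p = 0 := Int.ediv_eq_zero_of_lt hn hnp
  simp [hq]

theorem tSum_zero {n p : Int} (hn : 0 ≤ n) (hnp : n < p) : ∀ K, tSum n p K = 0 := by
  intro K
  induction K generalizing p with
  | zero => rfl
  | succ K ih =>
      simp [tSum, sumFloorB_zero hn hnp, ih (p := 5 * p) (by omega)]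

theorem gtSum_zero {n p : Int} (hn : 0 ≤ n) (hnp : n < p) : ∀ K, gtSum n p K = 0 := by
  intro K
  induction K generalizing p with
  | zero => rfl
  | succ K ih =>
      have hp : 0 < p := by omega
      have hd : PySem.Int.floordiv n p = 0 := by
        rw [PySem.Int.floordiv_eq_ediv_of_pos hp]; exact Int.ediv_eq_zero_of_lt hn hnp
      simp [gtSum, hd, ih (p := 5 * p) (by omega)]

theorem powLoopB_eq_tSum {n : Int} (hn : 0 ≤ n) :
    ∀ (K : Nat) (p : Int), 0 < p → n < p * 5 ^ K → powLoopB n p = tSum n p K := by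
  intro K
  induction K with
  | zero =>
      intro p hp hK
      rw [powLoopB.eq_def]
      simp only [pow_zero, mul_one] at hK
      simp [tSum, show ¬(p ≤ n ∧ 0 < p) by omega]
  | succ K ih =>
      intro p hp hK
      have h5 : p * 5 ^ (K + 1) = 5 * p * 5 ^ K := by rw [pow_succ]; ring
      rw [h5] at hK
      rw [powLoopB.eq_def]
      by_cases hpn : p ≤ n
      · simp only [hpn, hp, and_self, dite_true, tSum]
        rw [ih (5 * p) (by omega) hK]
      · have h0 : sumFloorB n p = 0 := sumFloorB_zero hn (by omega)
        simp [hpn, tSum, h0, tSum_zero (n := n) (p := 5 * p) hn (by omega) K]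

-- the key arithmetic step: the closed form increments by floor((n+1)/p)
theorem sumFloorB_succ {n p : Int} (hp : 0 < p) :
    sumFloorB (n + 1) p = sumFloorB n p + PySem.Int.floordiv (n + 1) p := by
  simp only [sumFloorB]
  rw [PySem.Int.floordiv_eq_ediv_of_pos hp, PySem.Int.mod_eq_emod_of_pos hp,
    PySem.Int.floordiv_eq_ediv_of_pos hp, PySem.Int.mod_eq_emod_of_pos hp,
    PySem.Int.floordiv_eq_ediv_of_pos (show (0:Int) < 2 by decide),
    PySem.Int.floordiv_eq_ediv_of_pos (show (0:Int) < 2 by decide)]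
  set q := n / p with hq
  set r := n % p with hr
  have hnqr : n = p * q + r := by rw [hq, hr]; exact (Int.mul_ediv_add_emod n p).symm
  have hr0 : 0 ≤ r := Int.emod_nonneg n (by omega)
  have hrp : r < p := Int.emod_lt_of_pos n hp
  rcases Int.even_mul_succ_self (q - 1) with ⟨t, ht'⟩
  have ht : q * (q - 1) = 2 * t := by linarith [ht']
  have hpt : (p * q * (q - 1)) / 2 = p * t := by
    rw [mul_assoc, ht, show p * (2 * t) = 2 * (p * t) by ring]
    exact Int.mul_ediv_cancel_left _ (by norm_num)
  by_cases hcase : r + 1 < p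
  · have h1 : (n + 1) / p = q ∧ (n + 1) % p = r + 1 :=
      (Int.ediv_emod_unique (by omega)).mpr ⟨by omega, by omega⟩
    rw [h1.1, h1.2, hpt]
    ring
  · have hex : p * (q + 1) = p * q + p := by ring
    have h1 : (n + 1) / p = q + 1 ∧ (n + 1) % p = 0 :=
      (Int.ediv_emod_unique (by omega)).mpr ⟨by omega, by omega⟩
    rcases Int.even_mul_succ_self q with ⟨s, hs'⟩
    have hs : (q + 1) * ((q + 1) - 1) = 2 * s := by linarith [hs']
    have hps : (p * (q + 1) * ((q + 1) - 1)) / 2 = p * s := by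
      rw [mul_assoc, hs, show p * (2 * s) = 2 * (p * s) by ring]
      exact Int.mul_ediv_cancel_left _ (by norm_num)
    have hst : s = t + q := by
      have : q * (q + 1) - q * (q - 1) = 2 * q := by ring
      omega
    rw [h1.1, h1.2, hps, hpt, hst]
    have hrp1 : r + 1 = p := by omega
    rw [← hrp1]
    ring

theorem tSum_succ {n : Int} :
    ∀ (K : Nat) (p : Int), 0 < p → tSum (n + 1) p K = tSum n p K + gtSum (n + 1) p K := by
  intro K
  induction K with
  | zero => intro p _; simp [tSum, gtSum]
  | succ K ih =>
      intro p hp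
      simp only [tSum, gtSum, sumFloorB_succ hp, ih (5 * p) (by omega)]
      ring

theorem gtSum_shift {n : Int} (hn : 0 ≤ n) :
    ∀ (K : Nat) (p : Int), 0 < p →
      gtSum (PySem.Int.floordiv n 5) p K = gtSum n (5 * p) K := by
  intro K
  induction K with
  | zero => intro p _; rfl
  | succ K ih =>
      intro p hp
      simp only [gtSum]
      rw [ih (5 * p) (by omega)]
      rw [PySem.Int.floordiv_eq_ediv_of_pos (show (0:Int) < 5 by decide),
        PySem.Int.floordiv_eq_ediv_of_pos hp,
        PySem.Int.floordiv_eq_ediv_of_pos (show (0:Int) < 5 * p by omega)]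
      rw [Int.ediv_ediv_of_nonneg (by omega : (0:Int) ≤ 5)]

theorem getmaxtimes_eq_gtSum :
    ∀ (m : Nat) (n : Int), 0 ≤ n → n < m → ∀ K : Nat, n < 5 * 5 ^ K →
      getmaxtimes n = gtSum n 5 K := by
  intro m
  induction m with
  | zero => intro n _ h; omega
  | succ m ih =>
      intro n hn hnm K hK
      by_cases hpos : 0 < n
      · have hdiv5 : PySem.Int.floordiv n 5 = n / 5 :=
          PySem.Int.floordiv_eq_ediv_of_pos (by decide)
        have hlt : n / 5 < n :=
          (Int.ediv_lt_iff_lt_mul (show (0:Int) < 5 by decide)).mpr (by omega)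
        have hd0 : 0 ≤ n / 5 := Int.ediv_nonneg hn (by decide)
        unfold getmaxtimes
        simp only [hpos, dite_true]
        cases K with
        | zero =>
            have h5 : n < 5 := by simpa using hK
            have : n / 5 = 0 := Int.ediv_eq_zero_of_lt hn h5
            rw [hdiv5, this, getmaxtimes]
            simp [gtSum]
        | succ K =>
            have hbound : n / 5 < 5 * 5 ^ K := by
              rw [Int.ediv_lt_iff_lt_mul (by decide)]
              calc n < 5 * 5 ^ (K + 1) := hK
                _ = 5 * 5 ^ K * 5 := by rw [pow_succ]; ring
            rw [show gtSum n 5 (K + 1) = PySem.Int.floordiv n 5 + gtSum n (5 * 5) K from rfl]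
            rw [← gtSum_shift hn K 5 (by decide)]
            rw [hdiv5] at *
            rw [ih (n / 5) hd0 (by omega) K hbound]
      · have hz : n = 0 := by omega
        subst hz
        unfold getmaxtimes
        simp [gtSum_zero (n := (0:Int)) (p := 5) (by decide) (by decide) K]

theorem func_alt_eq_tSum (m : Nat) (K : Nat) (h : (m : Int) < 5 * 5 ^ K) :
    func_alt m = tSum (m : Int) 5 K := by
  unfold func_alt
  by_cases hm : (m : Int) ≤ 0
  · have : m = 0 := by omega
    subst this
    simp [tSum_zero (n := (0:Int)) (p := 5) (by decide) (by decide) K]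
  · simp only [hm, if_false]
    exact powLoopB_eq_tSum (by omega) K 5 (by decide) (by simpa using h)

theorem pow_bound (m : Nat) : ((m : Int) + 1) < 5 * 5 ^ (m + 1) := by
  have h1 : m + 1 < 5 ^ (m + 1) := Nat.lt_pow_self (by omega)
  have h2 : ((m + 1 : Nat) : Int) < ((5 ^ (m + 1) : Nat) : Int) := by exact_mod_cast h1
  push_cast at h2
  nlinarith [pow_pos (show (0:Int) < 5 by decide) (m + 1)]

theorem func_alt_succ (m : Nat) :
    func_alt ((m : Int) + 1) = func_alt m + getmaxtimes ((m : Int) + 1) := by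
  have hb1 : ((m : Int) + 1) < 5 * 5 ^ (m + 1) := pow_bound m
  have hb0 : (m : Int) < 5 * 5 ^ (m + 1) := by omega
  have hcast : ((m : Int) + 1) = (((m + 1 : Nat)) : Int) := by push_cast; ring
  rw [hcast, func_alt_eq_tSum (m + 1) (m + 1) (by rw [← hcast]; exact hb1), ← hcast]
  rw [tSum_succ (m + 1) 5 (by decide)]
  rw [← func_alt_eq_tSum m (m + 1) hb0]
  rw [← getmaxtimes_eq_gtSum (m + 2) ((m : Int) + 1) (by omega) (by push_cast; omega) (m + 1) hb1]

theorem func_eq_sgSum (m : Nat) : func (m : Int) = sgSum m := by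
  induction m with
  | zero =>
      unfold func
      rw [if_neg (by omega)]
      rw [PySem.List.pyRange_one_eq_nil (by omega)]
      rfl
  | succ m ih =>
      unfold func
      rw [if_neg (by push_cast; omega)]
      have hsplit : PySem.List.pyRange 1 ((((m + 1 : Nat)) : Int) + 1) 1
          = PySem.List.pyRange 1 ((m : Int) + 1) 1 ++ [(m : Int) + 1] := by
        have : (((m + 1 : Nat)) : Int) + 1 = ((m : Int) + 1) + 1 := by push_cast; ring
        rw [this, PySem.List.pyRange_one_succ_right (by omega)]
      rw [hsplit, List.foldl_append]
      simp only [List.foldl_cons, List.foldl_nil]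
      unfold func at ih
      rw [if_neg (by omega)] at ih
      rw [ih]
      rfl

theorem sgSum_eq_func_alt (m : Nat) : sgSum m = func_alt m := by
  induction m with
  | zero => simp [sgSum, func_alt]
  | succ m ih =>
      have : sgSum (m + 1) = sgSum m + getmaxtimes ((m : Int) + 1) := rfl
      rw [this, ih, ← func_alt_succ m]
      norm_cast

-- ===== VERDICT (by name: the statement is the Claim_ definition above) =====
theorem func_spec : Claim_equal_func := by
  intro n _
  unfold Spec_func
  by_cases hneg : n < 0
  · unfold func func_alt
    rw [if_pos hneg, if_pos (by omega)]
  · have h0 : 0 ≤ n := by omega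
    obtain ⟨m, rfl⟩ : ∃ m : Nat, n = (m : Int) := ⟨n.toNat, by omega⟩
    rw [func_eq_sgSum m, sgSum_eq_func_alt m]
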